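-- pv_equiv track=rewrite | github.com/Kappa-Dev/ReGraph | regraph/utils.py | dict_sub
-- ===== SOURCE A (Python) =====
-- def dict_sub(attrs1, attrs2):
--     """Remove attributes `attrs2` from `attrs1`."""
--     new_dict = {}
--     for key in attrs1:
--         if key in attrs2:
--             new_set = attrs1[key].difference(attrs2[key])
--             if new_set:
--                 new_dict[key] = new_set
--         else:
--             new_dict[key] = attrs1[key]
--     return new_dict
-- ===== SOURCE B (Python) =====
-- def dict_sub(attrs1, attrs2):
--     """Remove attributes `attrs2` from `attrs1`."""
--     new_dict = dict(attrs1)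
--     for key, vals in attrs2.items():
--         if key in new_dict:
--             diff = new_dict[key].difference(vals)
--             if diff:
--                 new_dict[key] = diff
--             else:
--                 del new_dict[key]
--     return new_dict
-- ===== Notes on version B (the rewrite author's own statement) =====
-- stated objective: alternative
-- what changed: B copies attrs1 and then iterates over attrs2, pruning (overwrite with the difference or delete when it becomes empty), instead of building a new dict from empty while iterating attrs1 with a membership test per key.
import Mathlib
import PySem

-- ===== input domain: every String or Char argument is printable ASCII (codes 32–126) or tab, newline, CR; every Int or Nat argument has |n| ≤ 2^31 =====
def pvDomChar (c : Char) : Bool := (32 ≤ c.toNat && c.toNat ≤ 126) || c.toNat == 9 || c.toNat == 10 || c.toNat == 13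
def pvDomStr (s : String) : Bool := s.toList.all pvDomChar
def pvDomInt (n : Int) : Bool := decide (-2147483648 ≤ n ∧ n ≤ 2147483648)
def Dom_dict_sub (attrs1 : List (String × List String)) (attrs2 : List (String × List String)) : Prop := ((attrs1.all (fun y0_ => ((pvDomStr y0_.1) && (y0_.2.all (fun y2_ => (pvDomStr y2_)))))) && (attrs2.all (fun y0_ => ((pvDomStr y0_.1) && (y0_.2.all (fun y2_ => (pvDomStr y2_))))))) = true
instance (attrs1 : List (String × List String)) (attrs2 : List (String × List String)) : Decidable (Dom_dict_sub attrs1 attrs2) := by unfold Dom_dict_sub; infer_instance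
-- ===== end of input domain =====

-- B copies attrs1 and prunes it while iterating attrs2 (overwrite-or-delete), instead of
-- building a new dict from empty while iterating attrs1; an alternative decomposition, not faster.


-- ===== PORT A =====
-- Literal port of A: iterate attrs1, build new_dict from empty; `key in attrs2` /
-- `attrs2[key]` become one first-match find? on the association list.
def dict_sub (attrs1 : List (String × List String)) (attrs2 : List (String × List String)) : List (String × List String) :=
  attrs1.foldl (fun nd p =>
    match attrs2.find? (fun q => q.1 == p.1) with
    | some q =>
      let ns := p.2.filter (fun x => !(q.2.contains x))
      if ns.isEmpty then nd else nd ++ [(p.1, ns)]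
    | none => nd ++ [p]) []

-- ===== PORT B =====
-- One pruning step of Source B's loop body: if key is in new_dict, overwrite its entry with the
-- difference, or delete the entry when the difference is empty (filterMap on the matching entry).
def dictSubPrune (nd : List (String × List String)) (k2 : String) (v2 : List String) : List (String × List String) :=
  if nd.any (fun p => p.1 == k2) then
    nd.filterMap (fun p =>
      if p.1 == k2 then
        let d := p.2.filter (fun x => !(v2.contains x))
        if d.isEmpty then none else some (p.1, d)
      else some p)
  else nd

def dict_sub_alt (attrs1 : List (String × List String)) (attrs2 : List (String × List String)) : List (String × List String) :=
  attrs2.foldl (fun nd p => dictSubPrune nd p.1 p.2) attrs1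

-- ===== PRECONDITION & SPEC =====
-- Pre_ excludes attrs2 association lists with duplicate keys: those do not represent any Python
-- dict (dicts have unique keys), and on them B's sequential pruning would subtract the duplicate
-- entries cumulatively while a dict lookup takes only the first match.
def Pre_dict_sub (attrs1 : List (String × List String)) (attrs2 : List (String × List String)) : Prop :=
  (attrs2.map Prod.fst).Nodup
instance (attrs1 : List (String × List String)) (attrs2 : List (String × List String)) : Decidable (Pre_dict_sub attrs1 attrs2) := by unfold Pre_dict_sub; infer_instance

def pvWitness_dict_sub : (List (String × List String)) × (List (String × List String)) :=
  ([("color", ["red", "blue"]), ("shape", ["round"])], [("color", ["blue"]), ("size", ["big"])])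

def Spec_dict_sub (attrs1 : List (String × List String)) (attrs2 : List (String × List String)) (out : List (String × List String)) : Prop := out = dict_sub_alt attrs1 attrs2
instance (attrs1 : List (String × List String)) (attrs2 : List (String × List String)) (out : List (String × List String)) : Decidable (Spec_dict_sub attrs1 attrs2 out) := by unfold Spec_dict_sub; infer_instance

-- ===== CLAIM (what is proved, stated in full; the proofs are below) =====
def Claim_equal_dict_sub : Prop := ∀ (attrs1 : List (String × List String)) (attrs2 : List (String × List String)), Dom_dict_sub attrs1 attrs2 → Pre_dict_sub attrs1 attrs2 → Spec_dict_sub attrs1 attrs2 (dict_sub attrs1 attrs2)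

-- ===== LEMMAS AND PROOFS =====

-- Per-entry characterisation shared by both proofs: what happens to one attrs1 entry.
def pvStep (attrs2 : List (String × List String)) (p : String × List String) : Option (String × List String) :=
  match attrs2.find? (fun q => q.1 == p.1) with
  | some q =>
    let ns := p.2.filter (fun x => !(q.2.contains x))
    if ns.isEmpty then none else some (p.1, ns)
  | none => some p

-- A foldl whose body appends an optional element is the filterMap of that option.
theorem foldl_filterMap_gen {α β : Type} (F : List β → α → List β) (G : α → Option β)
    (h : ∀ nd p, F nd p = nd ++ (G p).toList) :
    ∀ (l : List α) (nd : List β), l.foldl F nd = nd ++ l.filterMap G := by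
  intro l
  induction l with
  | nil => intro nd; simp
  | cons p rest ih =>
    intro nd
    rw [List.foldl_cons, h nd p, ih, List.filterMap_cons]
    cases G p <;> simp

theorem dict_sub_eq_filterMap (attrs1 attrs2 : List (String × List String)) :
    dict_sub attrs1 attrs2 = attrs1.filterMap (pvStep attrs2) := by
  have h : ∀ (nd : List (String × List String)) (p : String × List String),
      (match attrs2.find? (fun q => q.1 == p.1) with
       | some q =>
         let ns := p.2.filter (fun x => !(q.2.contains x))
         if ns.isEmpty then nd else nd ++ [(p.1, ns)]
       | none => nd ++ [p]) = nd ++ (pvStep attrs2 p).toList := by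
    intro nd p
    cases hf : attrs2.find? (fun q => q.1 == p.1) with
    | none => simp [pvStep, hf]
    | some q =>
      by_cases he : ∀ a ∈ p.2, a ∈ q.2
      · simp [pvStep, hf]
        rw [if_pos he]
        simp
        exact he
      · simp [pvStep, hf, he]
  unfold dict_sub
  rw [foldl_filterMap_gen _ (pvStep attrs2) h attrs1 [], List.nil_append]

-- dictSubPrune is a filterMap over the current dict, with or without the `key in new_dict` guard.
theorem dictSubPrune_eq_filterMap (nd : List (String × List String)) (k2 : String) (v2 : List String) :
    dictSubPrune nd k2 v2 = nd.filterMap (fun p =>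
      if p.1 == k2 then
        let d := p.2.filter (fun x => !(v2.contains x))
        if d.isEmpty then none else some (p.1, d)
      else some p) := by
  have key : ∀ (l : List (String × List String)), (∀ p ∈ l, ¬ (p.1 == k2) = true) →
      l.filterMap (fun p =>
        if p.1 == k2 then
          let d := p.2.filter (fun x => !(v2.contains x))
          if d.isEmpty then none else some (p.1, d)
        else some p) = l := by
    intro l
    induction l with
    | nil => intro _; rfl
    | cons p rest ih =>
      intro hall
      have hp : ¬ (p.1 == k2) = true := hall p (by simp)
      rw [List.filterMap_cons, if_neg hp, ih (fun q hq => hall q (by simp [hq]))]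
  unfold dictSubPrune
  split
  · rfl
  · rename_i h
    have h' : ∀ p ∈ nd, ¬ (p.1 == k2) = true := by
      intro p hp hc
      exact h (List.any_eq_true.mpr ⟨p, hp, hc⟩)
    exact (key nd h').symm

theorem dict_sub_alt_eq_filterMap (attrs2 : List (String × List String))
    (hnd : (attrs2.map Prod.fst).Nodup) (attrs1 : List (String × List String)) :
    dict_sub_alt attrs1 attrs2 = attrs1.filterMap (pvStep attrs2) := by
  induction attrs2 generalizing attrs1 with
  | nil =>
    simp [dict_sub_alt, pvStep]
  | cons q rest ih =>
    have hrest : (rest.map Prod.fst).Nodup := (List.nodup_cons.mp hnd).2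
    have hnotin : q.1 ∉ rest.map Prod.fst := (List.nodup_cons.mp hnd).1
    have h1 : dict_sub_alt attrs1 (q :: rest) = dict_sub_alt (dictSubPrune attrs1 q.1 q.2) rest := by
      simp [dict_sub_alt]
    rw [h1, ih hrest, dictSubPrune_eq_filterMap, List.filterMap_filterMap]
    apply List.filterMap_congr
    intro p _
    by_cases hk : p.1 = q.1
    · by_cases he : ∀ a ∈ p.2, a ∈ q.2
      · simp [pvStep, hk]
        rw [if_pos he]
        simp
      · have hf : rest.find? (fun r => r.1 == q.1) = none := by
          rw [List.find?_eq_none]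
          intro r hr hc
          have hr1 : r.1 = q.1 := by simpa using hc
          exact hnotin (hr1 ▸ List.mem_map.mpr ⟨r, hr, rfl⟩)
        simp [pvStep, hk, he, hf]
    · have hk2 : ¬ q.1 = p.1 := fun h => hk h.symm
      simp [pvStep, hk, hk2]

-- ===== VERDICT (by name: the statement is the Claim_ definition above) =====
theorem dict_sub_spec : Claim_equal_dict_sub := by
  intro attrs1 attrs2 _ hpre
  unfold Spec_dict_sub
  rw [dict_sub_eq_filterMap, dict_sub_alt_eq_filterMap attrs2 hpre attrs1]
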